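-- pv_equiv track=rewrite | github.com/dipesh-commits/computer-vision-projects | Fraud Detection/fraud_detect_image.py | getConnectedPixels
-- ===== SOURCE A (Python) =====
-- def getConnectedPixels(edges:list,total_white_pixels:int) -> list:
-- 	"""
-- 	Helps to find connections for each pixels
--
-- 	Args:
-- 		edges: edges after looping through XY coordinates
-- 		total_white_pixels: total number of white pixels for each pixels
--
-- 	Returns:
-- 		cpl: all connected pixels labeling
-- 	"""
--
-- 	cpl = []
--
-- 	for index in range(0,total_white_pixels):
--
-- 		# create new element for new pixel
-- 		cpl.append([index])
--
-- 		# index of the last element of list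
-- 		cpl_index = (len(cpl) - 1)
--
-- 		for i in range(0,len(edges)):
--
-- 			edge = edges[i]
-- 			start = edge[0]
-- 			end = edge[1]
--
-- 			# edges (V1->V2) where {start: V1, end: V2}
-- 			if start == index:
-- 				cpl[cpl_index].append(end)
-- 				continue
-- 			elif end == index:
-- 				cpl[cpl_index].append(start)
-- 				continue
--
-- 		# remove all pixels with no connections
-- 		if len(cpl[cpl_index]) == 1:
-- 			cpl.remove(cpl[cpl_index])
--
-- 	return cpl
-- ===== SOURCE B (Python) =====
-- def getConnectedPixels(edges: list, total_white_pixels: int) -> list: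
--     """Single pass over edges bucketing neighbors per vertex, then emit in index order."""
--     nbrs = {}
--     for edge in edges:
--         start, end = edge[0], edge[1]
--         nbrs.setdefault(start, []).append(end)
--         if end != start:
--             nbrs.setdefault(end, []).append(start)
--     return [[i] + nbrs[i] for i in range(total_white_pixels) if i in nbrs]
-- ===== Notes on version B (the rewrite author's own statement) =====
-- stated objective: faster
-- what changed: Replaces A's rescan of the whole edge list for every pixel index (and the append-then-remove of isolated pixels) by a single pass over the edges that buckets neighbors into a per-vertex dict, then emits the buckets in index order.
-- outside the precondition, e.g. on getConnectedPixels([[], [0]], -1): A returns [], B raises IndexError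
import Mathlib
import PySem

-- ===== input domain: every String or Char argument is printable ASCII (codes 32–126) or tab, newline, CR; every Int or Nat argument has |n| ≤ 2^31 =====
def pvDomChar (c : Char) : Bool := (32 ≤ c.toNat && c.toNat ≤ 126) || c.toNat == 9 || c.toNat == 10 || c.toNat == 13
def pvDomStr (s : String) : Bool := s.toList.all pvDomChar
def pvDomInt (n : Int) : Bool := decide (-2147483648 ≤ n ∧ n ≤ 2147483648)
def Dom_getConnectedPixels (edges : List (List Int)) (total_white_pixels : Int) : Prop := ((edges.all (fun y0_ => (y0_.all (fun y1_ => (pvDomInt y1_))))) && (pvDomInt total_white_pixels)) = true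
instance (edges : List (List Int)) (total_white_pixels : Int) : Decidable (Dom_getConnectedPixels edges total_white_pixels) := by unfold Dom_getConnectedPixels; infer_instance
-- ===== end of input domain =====

-- B replaces A's per-index rescan of all edges by one bucketing pass over the edges (objective: faster).

-- ===== PORT A =====
-- inner loop: for i in range(0, len(edges)): ... appends to the last row of cpl
def getConnectedPixels_inner (edges : List (List Int)) (index : Int) (row : List Int) : List Int :=
  (PySem.List.pyRange 0 (PySem.List.len edges) 1).foldl
    (fun row i =>
      let edge := PySem.List.pyGetD edges i []
      let start := PySem.List.pyGetD edge 0 0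
      let «end» := PySem.List.pyGetD edge 1 0
      if start = index then row ++ [«end»]
      else if «end» = index then row ++ [start]
      else row)
    row

def getConnectedPixels (edges : List (List Int)) (total_white_pixels : Int) : List (List Int) :=
  (PySem.List.pyRange 0 total_white_pixels 1).foldl
    (fun cpl index =>
      -- cpl.append([index]); the inner loop mutates that last element in place
      let row := getConnectedPixels_inner edges index [index]
      let cpl' := cpl ++ [row]
      -- remove all pixels with no connections (list.remove: first match; present here, so getD never fires)
      if row.length = 1 then (PySem.List.remove? cpl' row).getD cpl' else cpl')
    []

-- ===== PORT B =====
def getConnectedPixels_alt (edges : List (List Int)) (total_white_pixels : Int) : List (List Int) :=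
  let nbrs : PySem.Dict Int (List Int) :=
    edges.foldl
      (fun d edge =>
        let start := PySem.List.pyGetD edge 0 0
        let «end» := PySem.List.pyGetD edge 1 0
        -- nbrs.setdefault(start, []).append(end)
        let d := d.insert start (d.getD start [] ++ [«end»])
        -- if end != start: nbrs.setdefault(end, []).append(start)
        if «end» ≠ start then d.insert «end» (d.getD «end» [] ++ [start]) else d)
      PySem.Dict.empty
  -- [[i] + nbrs[i] for i in range(total_white_pixels) if i in nbrs]
  (PySem.List.pyRange 0 total_white_pixels 1).filterMap
    (fun i => (nbrs.get? i).map (fun l => i :: l))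

-- ===== PRECONDITION & SPEC =====
-- Pre_ excludes the inputs where some edge has fewer than two entries: edge[0]/edge[1] raises IndexError in B always and in A whenever total_white_pixels > 0; with total_white_pixels <= 0, A skips the edges and returns [] while B still scans them and raises.
def Pre_getConnectedPixels (edges : List (List Int)) (total_white_pixels : Int) : Prop :=
  ∀ edge ∈ edges, 2 ≤ edge.length
instance (edges : List (List Int)) (total_white_pixels : Int) : Decidable (Pre_getConnectedPixels edges total_white_pixels) := by unfold Pre_getConnectedPixels; infer_instance
def pvWitness_getConnectedPixels : List (List Int) × Int := ([[0, 1], [2, 1]], 3)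

def Spec_getConnectedPixels (edges : List (List Int)) (total_white_pixels : Int) (out : List (List Int)) : Prop := out = getConnectedPixels_alt edges total_white_pixels
instance (edges : List (List Int)) (total_white_pixels : Int) (out : List (List Int)) : Decidable (Spec_getConnectedPixels edges total_white_pixels out) := by unfold Spec_getConnectedPixels; infer_instance

-- ===== CLAIM (what is proved, stated in full; the proofs are below) =====
def Claim_equal_getConnectedPixels : Prop := ∀ (edges : List (List Int)) (total_white_pixels : Int), Dom_getConnectedPixels edges total_white_pixels → Pre_getConnectedPixels edges total_white_pixels → Spec_getConnectedPixels edges total_white_pixels (getConnectedPixels edges total_white_pixels)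

-- ===== LEMMAS AND PROOFS =====

-- the neighbors a single edge contributes to pixel i (the same in A's branch order and B's bucketing)
def pvNb (i : Int) (edge : List Int) : List Int :=
  let s := PySem.List.pyGetD edge 0 0
  let e := PySem.List.pyGetD edge 1 0
  if s = i then [e] else if e = i then [s] else []

-- the full neighbor list of pixel i, in edge order
def pvF (i : Int) (edges : List (List Int)) : List Int := edges.flatMap (pvNb i)

def pvCombine (o : Option (List Int)) (l : List Int) : Option (List Int) :=
  match o with
  | some v => some (v ++ l)
  | none => if l = [] then none else some l

theorem pvCombine_assoc (o : Option (List Int)) (l₁ l₂ : List Int) :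
    pvCombine (pvCombine o l₁) l₂ = pvCombine o (l₁ ++ l₂) := by
  cases o with
  | some v => simp [pvCombine]
  | none =>
    by_cases h : l₁ = [] <;> simp [pvCombine, h]

-- one bucketing step of B's dict loop, seen through get?
theorem pv_step_get? (d : PySem.Dict Int (List Int)) (edge : List Int) (i : Int) :
    (let start := PySem.List.pyGetD edge 0 0
     let «end» := PySem.List.pyGetD edge 1 0
     let d' := d.insert start (d.getD start [] ++ [«end»])
     if «end» ≠ start then d'.insert «end» (d'.getD «end» [] ++ [start]) else d').get? i
      = pvCombine (d.get? i) (pvNb i edge) := by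
  by_cases hes : PySem.List.pyGetD edge 1 0 = PySem.List.pyGetD edge 0 0 <;>
    by_cases his : i = PySem.List.pyGetD edge 0 0 <;>
      by_cases hie : i = PySem.List.pyGetD edge 1 0 <;>
        cases hd : d.get? i <;>
          (simp_all [pvNb, pvCombine, PySem.Dict.get?_insert, PySem.Dict.getD] <;> (try omega) <;> (split_ifs <;> simp_all))

-- B's dict after the whole pass, seen through get?
theorem pv_build_get? (edges : List (List Int)) (d : PySem.Dict Int (List Int)) (i : Int) :
    (edges.foldl
      (fun d edge =>
        let start := PySem.List.pyGetD edge 0 0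
        let «end» := PySem.List.pyGetD edge 1 0
        let d := d.insert start (d.getD start [] ++ [«end»])
        if «end» ≠ start then d.insert «end» (d.getD «end» [] ++ [start]) else d)
      d).get? i = pvCombine (d.get? i) (pvF i edges) := by
  induction edges generalizing d with
  | nil => cases hd : d.get? i <;> simp [pvF, pvCombine, hd]
  | cons edge rest ih =>
    simp only [List.foldl_cons]
    rw [ih, pv_step_get? d edge i]
    rw [pvCombine_assoc]
    simp [pvF]

-- A's inner edge loop appends exactly pvF
theorem pv_inner_eq (edges : List (List Int)) (index : Int) (row : List Int) :
    getConnectedPixels_inner edges index row = row ++ pvF index edges := by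
  unfold getConnectedPixels_inner
  rw [PySem.List.foldl_pyRange_zero_pyGetD edges ([] : List Int)
      (fun row edge =>
        let start := PySem.List.pyGetD edge 0 0
        let «end» := PySem.List.pyGetD edge 1 0
        if start = index then row ++ [«end»]
        else if «end» = index then row ++ [start]
        else row) row]
  induction edges generalizing row with
  | nil => simp [pvF]
  | cons edge rest ih =>
    simp only [List.foldl_cons]
    rw [ih]
    simp only [pvF, List.flatMap_cons, pvNb]
    by_cases h1 : PySem.List.pyGetD edge 0 0 = index <;>
      by_cases h2 : PySem.List.pyGetD edge 1 0 = index <;>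
      simp [h1, h2]

theorem pv_remove_append (acc : List (List Int)) (x : List Int) (hx : x ∉ acc) :
    PySem.List.remove? (acc ++ [x]) x = some acc := by
  induction acc with
  | nil => simp
  | cons a rest ih =>
    have hne : a ≠ x := fun h => hx (h ▸ List.mem_cons_self)
    have hx' : x ∉ rest := fun h => hx (List.mem_cons_of_mem _ h)
    rw [List.cons_append, PySem.List.remove?_cons_of_ne _ hne, ih hx']
    rfl

-- A's outer loop, given that every row already in the accumulator has length ≠ 1
theorem pv_outer_eq (edges : List (List Int)) (l : List Int) (acc : List (List Int))
    (hacc : ∀ r ∈ acc, r.length ≠ 1) :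
    l.foldl
      (fun cpl index =>
        let row := getConnectedPixels_inner edges index [index]
        let cpl' := cpl ++ [row]
        if row.length = 1 then (PySem.List.remove? cpl' row).getD cpl' else cpl')
      acc
    = acc ++ l.flatMap (fun i => if pvF i edges = [] then [] else [i :: pvF i edges]) := by
  induction l generalizing acc with
  | nil => simp
  | cons i rest ih =>
    simp only [List.foldl_cons, List.flatMap_cons]
    rw [pv_inner_eq]
    by_cases hf : pvF i edges = []
    · have hrow : ([i] ++ pvF i edges).length = 1 := by simp [hf]
      have hnotmem : [i] ++ pvF i edges ∉ acc := by
        intro hm; exact hacc _ hm hrow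
      simp only [if_pos hrow, pv_remove_append acc _ hnotmem, Option.getD_some]
      rw [ih acc hacc]
      simp [hf]
    · have hrow : ¬ ([i] ++ pvF i edges).length = 1 := by
        simp only [List.length_append, List.length_cons, List.length_nil]
        have : 0 < (pvF i edges).length := List.length_pos_of_ne_nil hf
        omega
      simp only [if_neg hrow]
      rw [ih (acc ++ [[i] ++ pvF i edges]) ?_]
      · simp [hf]
      · intro r hr
        rcases List.mem_append.mp hr with h | h
        · exact hacc _ h
        · simp only [List.mem_singleton] at h
          subst h; exact hrow

-- ===== VERDICT (by name: the statement is the Claim_ definition above) =====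
theorem getConnectedPixels_spec : Claim_equal_getConnectedPixels := by
  intro edges total _ _
  unfold Spec_getConnectedPixels getConnectedPixels getConnectedPixels_alt
  rw [pv_outer_eq edges _ [] (by simp)]
  simp only [List.nil_append]
  induction PySem.List.pyRange 0 total 1 with
  | nil => simp
  | cons i rest ih =>
    simp only [List.flatMap_cons, List.filterMap_cons]
    rw [pv_build_get? edges PySem.Dict.empty i]
    simp only [PySem.Dict.get?_empty, pvCombine]
    by_cases hf : pvF i edges = [] <;> simp [hf, ih]
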